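-- pv_equiv track=rewrite | github.com/Byongho96/algorithm_practice | Baekjoon/2900_프로그램.py | solution
-- ===== SOURCE A (Python) =====
-- from collections import Counter
--
-- def something(N, arr, jump, cnt):
--     i = 1
--     while i < N + 1:
--         arr[i] += cnt
--         i += jump
--
-- def solution(N, K, jumps, checks):
--     arr = [0] * (N + 1)
--
--     # 카운터
--     counter = Counter(jumps)
--
--     # 점프 실행
--     for jump, cnt in counter.items():
--         something(N, arr, jump, cnt)
--
--     # 누적합
--     for i in range(2, N + 1):
--         arr[i] += arr[i - 1]
--
--     # 답안 출력
--     answer = []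
--     for l, r in checks:
--         answer.append(arr[r + 1] - arr[l])
--
--     return answer
-- ===== SOURCE B (Python) =====
-- def solution(N, K, jumps, checks):
--     cnt = {}
--     for j in jumps:
--         cnt[j] = cnt.get(j, 0) + 1
--     arr = [0] + [sum(c * ((i - 1) // d + 1) for d, c in cnt.items())
--                  for i in range(1, N + 1)]
--     return [arr[r + 1] - arr[l] for l, r in checks]
-- ===== Notes on version B (the rewrite author's own statement) =====
-- stated objective: alternative
-- what changed: Replaces the per-jump sieve marking followed by an in-place prefix-sum pass with a direct closed-form fill: each prefix cell is computed in one pass over positions as a sum of floor-division counts cnt_d*((i-1)//d+1) over the distinct jumps, and queries are answered from that table.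
import Mathlib
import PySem

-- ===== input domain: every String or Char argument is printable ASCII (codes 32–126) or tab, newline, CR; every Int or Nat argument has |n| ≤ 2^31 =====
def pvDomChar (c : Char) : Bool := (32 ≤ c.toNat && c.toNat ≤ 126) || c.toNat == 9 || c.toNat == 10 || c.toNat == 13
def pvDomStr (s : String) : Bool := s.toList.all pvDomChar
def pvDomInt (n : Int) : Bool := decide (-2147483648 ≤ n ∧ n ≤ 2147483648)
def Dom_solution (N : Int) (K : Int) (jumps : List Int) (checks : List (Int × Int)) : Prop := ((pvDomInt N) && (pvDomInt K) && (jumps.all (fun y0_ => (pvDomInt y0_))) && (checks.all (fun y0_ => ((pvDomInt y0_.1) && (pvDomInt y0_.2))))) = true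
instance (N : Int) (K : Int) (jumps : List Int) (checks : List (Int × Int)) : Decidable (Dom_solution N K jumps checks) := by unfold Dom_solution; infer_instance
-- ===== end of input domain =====

-- B replaces the sieve-marking plus prefix-sum passes with a direct closed-form fill of the
-- prefix table (cnt_d * ((i-1)//d + 1) summed over distinct jumps); same return value.
-- A mutates its local list only; the caller observes the return value alone.


-- ===== PORT A =====
-- arr[i] += c — the Python list is ported as Array Int (O(1) update); exact for 0 ≤ i < size,
-- which the marking loop maintains under Pre_ (a negative i would wrap in Python; unreachable here)
def pvAddAt (arr : Array Int) (i : Int) (c : Int) : Array Int :=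
  arr.setIfInBounds i.toNat (arr.getD i.toNat 0 + c)

-- the 'while i < N + 1' loop of `something`; fuel (N+1).toNat suffices whenever jump ≥ 1
-- (under Pre_ the Python loop runs at most N times; for jump ≤ 0 with N ≥ 1 the Python diverges
-- or raises — those inputs are outside Pre_)
def pvMarkLoop (fuel : Nat) (N : Int) (i jump cnt : Int) (arr : Array Int) : Array Int :=
  match fuel with
  | 0 => arr
  | f + 1 => if i < N + 1 then pvMarkLoop f N (i + jump) jump cnt (pvAddAt arr i cnt) else arr

def pvSomething (N : Int) (arr : Array Int) (jump cnt : Int) : Array Int :=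
  pvMarkLoop (N + 1).toNat N 1 jump cnt arr

def solution (N : Int) (K : Int) (jumps : List Int) (checks : List (Int × Int)) : List Int :=
  let arr0 : Array Int := Array.replicate (N + 1).toNat 0
  let counter := PySem.Dict.counter jumps
  let marked := counter.items.foldl (fun a p => pvSomething N a p.1 p.2) arr0
  -- arr[i] += arr[i-1] for i in range(2, N+1): i ≥ 2, so .toNat indexing is Python-exact here
  let pref := (PySem.List.pyRange 2 (N + 1) 1).foldl
      (fun a i => a.setIfInBounds i.toNat (a.getD i.toNat 0 + a.getD (i - 1).toNat 0)) marked
  let arr := pref.toList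
  checks.foldl (fun ans p => ans ++ [PySem.List.pyGetD arr (p.2 + 1) 0 - PySem.List.pyGetD arr p.1 0]) []

-- ===== PORT B =====
def solution_alt (N : Int) (K : Int) (jumps : List Int) (checks : List (Int × Int)) : List Int :=
  let cnt := jumps.foldl (fun d x => d.insert x (d.getD x 0 + 1)) PySem.Dict.empty
  let arr : List Int := 0 :: (PySem.List.pyRange 1 (N + 1) 1).map (fun i =>
      cnt.items.foldl (fun s p => s + p.2 * (PySem.Int.floordiv (i - 1) p.1 + 1)) 0)
  checks.map (fun p => PySem.List.pyGetD arr (p.2 + 1) 0 - PySem.List.pyGetD arr p.1 0)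

-- ===== PRECONDITION & SPEC =====
-- Exactly where the Python A returns: a jump ≤ 0 with N ≥ 1 makes A's while loop diverge (jump = 0)
-- or raise IndexError (jump < 0), and a query index outside Python's range for the length-(N+1) list
-- raises IndexError (negative indices down to -(N+1) wrap around and are admitted).
def Pre_solution (N : Int) (K : Int) (jumps : List Int) (checks : List (Int × Int)) : Prop :=
  (∀ j ∈ jumps, 1 ≤ j ∨ N ≤ 0) ∧
  (∀ c ∈ checks, (-(N + 1) ≤ c.1 ∧ c.1 ≤ N) ∧ (-(N + 1) ≤ c.2 + 1 ∧ c.2 + 1 ≤ N))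
instance (N : Int) (K : Int) (jumps : List Int) (checks : List (Int × Int)) : Decidable (Pre_solution N K jumps checks) := by unfold Pre_solution; infer_instance

def pvWitness_solution : Int × Int × List Int × (List (Int × Int)) := (3, 0, [2, 1, 2], [(0, 2), (1, 1), (-4, -2)])

def Spec_solution (N : Int) (K : Int) (jumps : List Int) (checks : List (Int × Int)) (out : List Int) : Prop := out = solution_alt N K jumps checks
instance (N : Int) (K : Int) (jumps : List Int) (checks : List (Int × Int)) (out : List Int) : Decidable (Spec_solution N K jumps checks out) := by unfold Spec_solution; infer_instance

-- ===== CLAIM (what is proved, stated in full; the proofs are below) =====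
def Claim_equal_solution : Prop := ∀ (N : Int) (K : Int) (jumps : List Int) (checks : List (Int × Int)), Dom_solution N K jumps checks → Pre_solution N K jumps checks → Spec_solution N K jumps checks (solution N K jumps checks)

-- ===== LEMMAS AND PROOFS =====

-- list-level models of port A's array pipeline (proof-side only)
def pvAddAtL (arr : List Int) (i : Int) (c : Int) : List Int :=
  PySem.List.pySetD arr i (PySem.List.pyGetD arr i 0 + c)

def pvMarkLoopL (fuel : Nat) (N : Int) (i jump cnt : Int) (arr : List Int) : List Int :=
  match fuel with
  | 0 => arr
  | f + 1 => if i < N + 1 then pvMarkLoopL f N (i + jump) jump cnt (pvAddAtL arr i cnt) else arr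

def pvSomethingL (N : Int) (arr : List Int) (jump cnt : Int) : List Int :=
  pvMarkLoopL (N + 1).toNat N 1 jump cnt arr

theorem pv_getDA (a : Array Int) (n : Nat) (d : Int) : a.getD n d = a.toList.getD n d := by
  rw [Array.getD_eq_getD_getElem?, List.getD, Array.getElem?_toList]

theorem pv_addAt_toList (a : Array Int) (i c : Int) (hi : 0 ≤ i) :
    (pvAddAt a i c).toList = pvAddAtL a.toList i c := by
  rw [pvAddAt, pvAddAtL, PySem.List.pySetD_of_nonneg _ _ hi, PySem.List.pyGetD_of_nonneg _ _ hi,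
    Array.toList_setIfInBounds, pv_getDA]

theorem pv_markLoop_toList (fuel : Nat) (N d c : Int) :
    ∀ (i : Int) (a : Array Int), 1 ≤ i → (1 ≤ d ∨ N + 1 ≤ i) →
      (pvMarkLoop fuel N i d c a).toList = pvMarkLoopL fuel N i d c a.toList := by
  induction fuel with
  | zero => intro i a _ _; rfl
  | succ f ih =>
    intro i a hi hdisj
    rw [pvMarkLoop, pvMarkLoopL]
    by_cases hcond : i < N + 1
    · have hd : 1 ≤ d := by omega
      rw [if_pos hcond, if_pos hcond, ih (i + d) _ (by omega) (Or.inl hd),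
        pv_addAt_toList a i c (by omega)]
    · rw [if_neg hcond, if_neg hcond]

theorem pv_markAll_toList (N : Int) (S : List (Int × Int)) (hkeys : ∀ p ∈ S, 1 ≤ p.1 ∨ N ≤ 0) :
    ∀ a : Array Int, (S.foldl (fun a p => pvSomething N a p.1 p.2) a).toList
      = S.foldl (fun l p => pvSomethingL N l p.1 p.2) a.toList := by
  induction S with
  | nil => intro a; rfl
  | cons p T ih =>
    intro a
    rw [List.foldl_cons, List.foldl_cons,
      ih (fun r hr => hkeys r (List.mem_cons_of_mem p hr)), pvSomething, pvSomethingL,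
      pv_markLoop_toList (N + 1).toNat N p.1 p.2 1 a le_rfl
        ((hkeys p List.mem_cons_self).imp id (fun h => by omega))]

theorem pv_prefix_toList (l : List Int) (hl : ∀ x ∈ l, 1 ≤ x) :
    ∀ a : Array Int,
      (l.foldl (fun a i => a.setIfInBounds i.toNat (a.getD i.toNat 0 + a.getD (i - 1).toNat 0)) a).toList
        = l.foldl (fun arr i => PySem.List.pySetD arr i
            (PySem.List.pyGetD arr i 0 + PySem.List.pyGetD arr (i - 1) 0)) a.toList := by
  induction l with
  | nil => intro a; rfl
  | cons x t ih =>
    intro a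
    have hx : 1 ≤ x := hl x List.mem_cons_self
    rw [List.foldl_cons, List.foldl_cons, ih (fun y hy => hl y (List.mem_cons_of_mem x hy)),
      PySem.List.pySetD_of_nonneg _ _ (by omega : (0:Int) ≤ x),
      PySem.List.pyGetD_of_nonneg _ _ (by omega : (0:Int) ≤ x),
      PySem.List.pyGetD_of_nonneg _ _ (by omega : (0:Int) ≤ x - 1),
      Array.toList_setIfInBounds, pv_getDA, pv_getDA]

theorem pv_keys (N : Int) (jumps : List Int) (hj : ∀ j ∈ jumps, 1 ≤ j ∨ N ≤ 0) :
    ∀ p ∈ (PySem.Dict.counter jumps).items, 1 ≤ p.1 ∨ N ≤ 0 := by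
  intro p hp
  have hmem : p.1 ∈ jumps := by
    rw [PySem.Dict.items_counter] at hp
    obtain ⟨k, hk, rfl⟩ := List.mem_map.mp hp
    exact (PySem.Set.mem_ofList jumps k).mp hk
  exact hj _ hmem


-- contribution of the distinct-jump list S at offset x (= position - 1)
def pvMvalI (S : List (Int × Int)) (x : Int) : Int :=
  (S.map (fun p => if p.1 ∣ x then p.2 else 0)).sum

theorem pv_getD_set (xs : List Int) (n q : Nat) (v : Int) :
    (xs.set n v).getD q 0 = if n = q ∧ n < xs.length then v else xs.getD q 0 := by
  simp only [List.getD, List.getElem?_set]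
  split_ifs with h1 h2 h3 h3 <;> simp_all
  omega

theorem pv_len_addAt (arr : List Int) (i c : Int) : (pvAddAtL arr i c).length = arr.length := by
  simp [pvAddAtL, PySem.List.length_pySetD]

theorem pv_getD_addAt (arr : List Int) (i c : Int) (hi : 0 ≤ i) (q : Nat) :
    (pvAddAtL arr i c).getD q 0
      = if i.toNat = q ∧ i.toNat < arr.length then arr.getD q 0 + c else arr.getD q 0 := by
  rw [pvAddAtL, PySem.List.pySetD_of_nonneg _ _ hi, PySem.List.pyGetD_of_nonneg _ _ hi,
    pv_getD_set]
  split_ifs with h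
  · rw [h.1]
  · rfl

theorem pv_markLoop_len (fuel : Nat) (N d c : Int) :
    ∀ (i : Int) (arr : List Int), (pvMarkLoopL fuel N i d c arr).length = arr.length := by
  induction fuel with
  | zero => intro i arr; rfl
  | succ f ih =>
    intro i arr
    rw [pvMarkLoopL]
    split
    · rw [ih, pv_len_addAt]
    · rfl

theorem pv_markLoop_getD (fuel : Nat) (N d c : Int) :
    ∀ (i : Int) (arr : List Int), (1 ≤ d ∨ N + 1 ≤ i) → 1 ≤ i → N + 1 ≤ i + fuel →
      (N + 1).toNat ≤ arr.length →
      ∀ q : Nat, (pvMarkLoopL fuel N i d c arr).getD q 0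
        = arr.getD q 0 + (if i ≤ (q : Int) ∧ (q : Int) ≤ N ∧ d ∣ ((q : Int) - i) then c else 0) := by
  induction fuel with
  | zero =>
    intro i arr _ _ hfuel _ q
    rw [pvMarkLoopL]
    have : ¬ (i ≤ (q : Int) ∧ (q : Int) ≤ N ∧ d ∣ ((q : Int) - i)) := by intro h; omega
    rw [if_neg this, add_zero]
  | succ f ih =>
    intro i arr hdisj hi hfuel hlen q
    rw [pvMarkLoopL]
    by_cases hcond : i < N + 1
    · rw [if_pos hcond]
      have hd : 1 ≤ d := by omega
      rw [ih (i + d) (pvAddAtL arr i c) (Or.inl hd) (by omega) (by omega)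
          (by rw [pv_len_addAt]; exact hlen),
        pv_getD_addAt arr i c (by omega) q]
      by_cases hq : (q : Int) = i
      · have h1 : i.toNat = q := by omega
        have h2 : i.toNat < arr.length := by omega
        have h3 : ¬ (i + d ≤ (q : Int) ∧ (q : Int) ≤ N ∧ d ∣ ((q : Int) - (i + d))) := by
          intro h; omega
        have h4 : i ≤ (q : Int) ∧ (q : Int) ≤ N ∧ d ∣ ((q : Int) - i) := by
          refine ⟨by omega, by omega, by rw [hq]; simp⟩
        rw [if_pos ⟨h1, h2⟩, if_neg h3, if_pos h4]
        ring
      · have h1 : ¬ (i.toNat = q ∧ i.toNat < arr.length) := by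
          rintro ⟨h, _⟩; omega
        rw [if_neg h1]
        congr 1
        have hdvd : d ∣ ((q : Int) - (i + d)) ↔ d ∣ ((q : Int) - i) := by
          constructor
          · intro h
            have heq : (q : Int) - i = ((q : Int) - (i + d)) + d := by ring
            rw [heq]; exact dvd_add h dvd_rfl
          · intro h
            have heq : (q : Int) - (i + d) = ((q : Int) - i) - d := by ring
            rw [heq]; exact dvd_sub h dvd_rfl
        by_cases hle : i + d ≤ (q : Int) ∧ (q : Int) ≤ N ∧ d ∣ ((q : Int) - (i + d))
        · rw [if_pos hle, if_pos ⟨by omega, hle.2.1, hdvd.mp hle.2.2⟩]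
        · rw [if_neg hle]
          by_cases h2 : i ≤ (q : Int) ∧ (q : Int) ≤ N ∧ d ∣ ((q : Int) - i)
          · exfalso
            apply hle
            have hpos : 0 < (q : Int) - i := by omega
            have := Int.le_of_dvd hpos h2.2.2
            exact ⟨by omega, h2.2.1, hdvd.mpr h2.2.2⟩
          · rw [if_neg h2]
    · rw [if_neg hcond]
      have : ¬ (i ≤ (q : Int) ∧ (q : Int) ≤ N ∧ d ∣ ((q : Int) - i)) := by intro h; omega
      rw [if_neg this, add_zero]


theorem pv_markAll_len (N : Int) (S : List (Int × Int)) :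
    ∀ arr : List Int, (S.foldl (fun a p => pvSomethingL N a p.1 p.2) arr).length = arr.length := by
  induction S with
  | nil => intro arr; rfl
  | cons p T ih =>
    intro arr
    rw [List.foldl_cons, ih, pvSomethingL, pv_markLoop_len]

theorem pv_markAll_getD (N : Int) (S : List (Int × Int)) :
    ∀ arr : List Int, (∀ p ∈ S, 1 ≤ p.1 ∨ N ≤ 0) → (N + 1).toNat ≤ arr.length →
      ∀ q : Nat, (S.foldl (fun a p => pvSomethingL N a p.1 p.2) arr).getD q 0
        = arr.getD q 0 + (if 1 ≤ (q : Int) ∧ (q : Int) ≤ N then pvMvalI S ((q : Int) - 1) else 0) := by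
  induction S with
  | nil =>
    intro arr _ _ q
    simp [pvMvalI]
  | cons p T ih =>
    intro arr hkeys hlen q
    rw [List.foldl_cons,
      ih (pvSomethingL N arr p.1 p.2) (fun r hr => hkeys r (List.mem_cons_of_mem p hr))
        (by rw [pvSomethingL, pv_markLoop_len]; exact hlen),
      pvSomethingL,
      pv_markLoop_getD (N + 1).toNat N p.1 p.2 1 arr
        ((hkeys p List.mem_cons_self).imp id (fun h => by omega))
        le_rfl (by omega) hlen q]
    have hsplit : pvMvalI (p :: T) ((q : Int) - 1)
        = (if p.1 ∣ ((q : Int) - 1) then p.2 else 0) + pvMvalI T ((q : Int) - 1) := by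
      simp [pvMvalI]
    rw [hsplit]
    by_cases hr : 1 ≤ (q : Int) ∧ (q : Int) ≤ N
    · rw [if_pos hr, if_pos hr]
      have : (1 ≤ (q : Int) ∧ (q : Int) ≤ N ∧ p.1 ∣ ((q : Int) - 1))
          ↔ (p.1 ∣ ((q : Int) - 1)) := by
        constructor
        · exact fun h => h.2.2
        · exact fun h => ⟨hr.1, hr.2, h⟩
      by_cases hdv : p.1 ∣ ((q : Int) - 1)
      · rw [if_pos (this.mpr hdv), if_pos hdv]; ring
      · rw [if_neg (fun h => hdv (this.mp h)), if_neg hdv]; ring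
    · rw [if_neg hr, if_neg hr, if_neg (fun h => hr ⟨h.1, h.2.1⟩)]
      ring

theorem pv_prefix_len (l : List Int) :
    ∀ arr : List Int,
      (l.foldl (fun a i => PySem.List.pySetD a i
        (PySem.List.pyGetD a i 0 + PySem.List.pyGetD a (i - 1) 0)) arr).length = arr.length := by
  induction l with
  | nil => intro arr; rfl
  | cons x t ih => intro arr; rw [List.foldl_cons, ih, PySem.List.length_pySetD]

theorem pv_prefix_getD (marked : List Int) (N : Int) (hlen : marked.length = (N + 1).toNat) :
    ∀ m : Nat, (m : Int) ≤ N - 1 →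
      ∀ q : Nat, ((PySem.List.pyRange 2 (2 + (m : Int)) 1).foldl
          (fun a i => PySem.List.pySetD a i
            (PySem.List.pyGetD a i 0 + PySem.List.pyGetD a (i - 1) 0)) marked).getD q 0
        = if 1 ≤ (q : Int) ∧ (q : Int) < 2 + (m : Int)
            then ((List.range q).map (fun u => marked.getD (u + 1) 0)).sum
            else marked.getD q 0 := by
  intro m
  induction m with
  | zero =>
    intro _ q
    rw [show ((0 : Nat) : Int) = 0 from rfl, add_zero, PySem.List.pyRange_one_eq_nil le_rfl,
      List.foldl_nil]
    split_ifs with h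
    · have hq : q = 1 := by omega
      subst hq
      simp
    · rfl
  | succ m ih =>
    intro hm q
    have hm' : (m : Int) ≤ N - 1 := by push_cast at hm ⊢; omega
    have hsplit : PySem.List.pyRange 2 (2 + ((m + 1 : Nat) : Int)) 1
        = PySem.List.pyRange 2 (2 + (m : Int)) 1 ++ [2 + (m : Int)] := by
      have : (2 + ((m + 1 : Nat) : Int)) = (2 + (m : Int)) + 1 := by push_cast; ring
      rw [this, PySem.List.pyRange_one_succ_right (by omega)]
    rw [hsplit, List.foldl_append, List.foldl_cons, List.foldl_nil]
    have hpflen : ((PySem.List.pyRange 2 (2 + (m : Int)) 1).foldl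
        (fun a i => PySem.List.pySetD a i
          (PySem.List.pyGetD a i 0 + PySem.List.pyGetD a (i - 1) 0)) marked).length
        = (N + 1).toNat := by rw [pv_prefix_len, hlen]
    set pf := (PySem.List.pyRange 2 (2 + (m : Int)) 1).foldl
      (fun a i => PySem.List.pySetD a i
        (PySem.List.pyGetD a i 0 + PySem.List.pyGetD a (i - 1) 0)) marked with hpf
    rw [PySem.List.pySetD_of_nonneg _ _ (by omega : (0:Int) ≤ 2 + (m : Int)),
      PySem.List.pyGetD_of_nonneg _ _ (by omega : (0:Int) ≤ 2 + (m : Int)),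
      PySem.List.pyGetD_of_nonneg _ _ (by omega : (0:Int) ≤ 2 + (m : Int) - 1),
      pv_getD_set]
    have ht1 : (2 + (m : Int)).toNat = m + 2 := by omega
    have ht2 : (2 + (m : Int) - 1).toNat = m + 1 := by omega
    rw [ht1, ht2]
    rw [ih hm' (m + 2), ih hm' (m + 1)]
    have hc1 : ¬ (1 ≤ ((m + 2 : Nat) : Int) ∧ ((m + 2 : Nat) : Int) < 2 + (m : Int)) := by
      intro h; push_cast at h; omega
    have hc2 : 1 ≤ ((m + 1 : Nat) : Int) ∧ ((m + 1 : Nat) : Int) < 2 + (m : Int) := by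
      push_cast; omega
    rw [if_neg hc1, if_pos hc2]
    by_cases hq : m + 2 = q
    · subst hq
      rw [if_pos ⟨rfl, by omega⟩, if_pos (by push_cast; omega)]
      have hsum : (List.map (fun u => marked.getD (u + 1) 0) (List.range (m + 1 + 1))).sum
          = (List.map (fun u => marked.getD (u + 1) 0) (List.range (m + 1))).sum
            + marked.getD (m + 1 + 1) 0 := by
        rw [List.range_succ, List.map_append, List.sum_append]
        simp only [List.map_cons, List.map_nil, List.sum_cons, List.sum_nil, add_zero]
      rw [show m + 2 = m + 1 + 1 from rfl, hsum]
      exact add_comm _ _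
    · rw [if_neg (by intro h; exact hq h.1), ih hm' q]
      by_cases h1 : 1 ≤ (q : Int) ∧ (q : Int) < 2 + (m : Int)
      · rw [if_pos h1, if_pos (by push_cast; omega)]
      · rw [if_neg h1]
        have : ¬ (1 ≤ (q : Int) ∧ (q : Int) < 2 + ((m + 1 : Nat) : Int)) := by
          intro h; push_cast at h h1; omega
        rw [if_neg this]


theorem pv_count_div (d c : Int) (hd : 1 ≤ d) :
    ∀ q : Nat, 1 ≤ q →
      ((List.range q).map (fun (u : Nat) => if d ∣ (u : Int) then c else 0)).sum
        = c * (PySem.Int.floordiv ((q : Int) - 1) d + 1) := by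
  intro q
  induction q with
  | zero => omega
  | succ q ih =>
    intro _
    by_cases hq : 1 ≤ q
    · rw [List.range_succ, List.map_append, List.sum_append, ih hq]
      simp only [List.map_cons, List.map_nil, List.sum_cons, List.sum_nil, add_zero]
      -- pass to Nat floor division
      obtain ⟨n, hn, rfl⟩ : ∃ n : Nat, 1 ≤ n ∧ d = (n : Int) :=
        ⟨d.toNat, by omega, by omega⟩
      have e1 : ((q + 1 : Nat) : Int) - 1 = ((q : Nat) : Int) := by push_cast; ring
      have e2 : ((q : Nat) : Int) - 1 = ((q - 1 : Nat) : Int) := by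
        push_cast [Nat.cast_sub hq]; ring
      rw [e1, e2, PySem.Int.floordiv_natCast, PySem.Int.floordiv_natCast]
      have hdvd : ((n : Int) ∣ (q : Int)) ↔ (n ∣ q) := Int.natCast_dvd_natCast
      have hstep : q / n = (q - 1) / n + if n ∣ q then 1 else 0 := by
        have := Nat.succ_div (a := q - 1) (b := n)
        rw [show q - 1 + 1 = q by omega] at this
        exact this
      rw [hstep]
      by_cases hdv : n ∣ q
      · rw [if_pos (hdvd.mpr hdv), if_pos hdv]
        push_cast
        ring
      · rw [if_neg (fun h => hdv (hdvd.mp h)), if_neg hdv]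
        push_cast
        ring
    · have hq0 : q = 0 := by omega
      subst hq0
      have : ((1 : Nat) : Int) - 1 = 0 := by norm_num
      rw [this]
      have hf : PySem.Int.floordiv 0 d = 0 := by
        rw [PySem.Int.floordiv_eq_ediv_of_pos (by omega)]
        simp
      rw [hf]
      simp

theorem pv_sum_swap (S : List (Int × Int)) (q : Nat) (hq : 1 ≤ q)
    (hd : ∀ p ∈ S, 1 ≤ p.1) :
    ((List.range q).map (fun (u : Nat) => pvMvalI S (u : Int))).sum
      = (S.map (fun p => p.2 * (PySem.Int.floordiv ((q : Int) - 1) p.1 + 1))).sum := by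
  induction S with
  | nil => simp [pvMvalI]
  | cons p T ih =>
    have hsplit : ∀ u : Nat, pvMvalI (p :: T) (u : Int)
        = (if p.1 ∣ (u : Int) then p.2 else 0) + pvMvalI T (u : Int) := by
      intro u; simp [pvMvalI]
    calc ((List.range q).map (fun (u : Nat) => pvMvalI (p :: T) (u : Int))).sum
        = ((List.range q).map (fun (u : Nat) =>
            (if p.1 ∣ (u : Int) then p.2 else 0) + pvMvalI T (u : Int))).sum := by
          rw [List.map_congr_left (fun u _ => hsplit u)]
      _ = ((List.range q).map (fun (u : Nat) => if p.1 ∣ (u : Int) then p.2 else 0)).sum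
            + ((List.range q).map (fun (u : Nat) => pvMvalI T (u : Int))).sum :=
          PySem.List.sum_map_add_int _ _ _
      _ = p.2 * (PySem.Int.floordiv ((q : Int) - 1) p.1 + 1)
            + (T.map (fun r => r.2 * (PySem.Int.floordiv ((q : Int) - 1) r.1 + 1))).sum := by
          rw [pv_count_div p.1 p.2 (hd p List.mem_cons_self) q hq,
            ih (fun r hr => hd r (List.mem_cons_of_mem p hr))]
      _ = ((p :: T).map (fun r => r.2 * (PySem.Int.floordiv ((q : Int) - 1) r.1 + 1))).sum := by
          simp


theorem pv_arrays_eq (N : Int) (jumps : List Int) (hN : 0 ≤ N)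
    (hj : ∀ j ∈ jumps, 1 ≤ j ∨ N ≤ 0) :
    ((PySem.List.pyRange 2 (N + 1) 1).foldl
        (fun a i => PySem.List.pySetD a i
          (PySem.List.pyGetD a i 0 + PySem.List.pyGetD a (i - 1) 0))
        (((PySem.Dict.counter jumps).items).foldl (fun a p => pvSomethingL N a p.1 p.2)
          (List.replicate (N + 1).toNat 0)))
      = 0 :: (PySem.List.pyRange 1 (N + 1) 1).map (fun i =>
          ((PySem.Dict.counter jumps).items).foldl
            (fun s p => s + p.2 * (PySem.Int.floordiv (i - 1) p.1 + 1)) 0) := by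
  set S := (PySem.Dict.counter jumps).items with hS
  have hkeys : ∀ p ∈ S, 1 ≤ p.1 ∨ N ≤ 0 := by
    intro p hp
    have hmem : p.1 ∈ jumps := by
      rw [hS, PySem.Dict.items_counter] at hp
      obtain ⟨k, hk, rfl⟩ := List.mem_map.mp hp
      exact (PySem.Set.mem_ofList jumps k).mp hk
    exact hj _ hmem
  have harr0 : ∀ q : Nat, (List.replicate (N + 1).toNat (0 : Int)).getD q 0 = 0 := by
    intro q
    by_cases h : q < (N + 1).toNat
    · rw [List.getD_replicate _ h]
    · rw [List.getD_eq_default]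
      rw [List.length_replicate]; omega
  have hmlen : (S.foldl (fun a p => pvSomethingL N a p.1 p.2)
      (List.replicate (N + 1).toNat 0)).length = (N + 1).toNat := by
    rw [pv_markAll_len, List.length_replicate]
  set marked := S.foldl (fun a p => pvSomethingL N a p.1 p.2)
      (List.replicate (N + 1).toNat (0 : Int)) with hmarked
  have hmget : ∀ q : Nat, marked.getD q 0
      = if 1 ≤ (q : Int) ∧ (q : Int) ≤ N then pvMvalI S ((q : Int) - 1) else 0 := by
    intro q
    rw [hmarked, pv_markAll_getD N S _ hkeys (by rw [List.length_replicate]), harr0, zero_add]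
  by_cases hN1 : N = 0
  · subst hN1
    rw [PySem.List.pyRange_one_eq_nil (by norm_num), List.foldl_nil,
      PySem.List.pyRange_one_eq_nil (by norm_num), List.map_nil]
    apply List.ext_getElem
    · rw [hmlen]; rfl
    · intro q h1 h2
      have hq : q = 0 := by
        rw [hmlen] at h1
        simp at h1
        omega
      subst hq
      rw [← List.getD_eq_getElem _ 0 h1, hmget 0]
      norm_num
  · have hN' : 1 ≤ N := by omega
    set m := (N - 1).toNat with hm
    have hmc : (m : Int) = N - 1 := by omega
    have hrange : N + 1 = 2 + (m : Int) := by omega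
    rw [hrange]
    have hpget := pv_prefix_getD marked N hmlen m (by omega)
    have hplen : ((PySem.List.pyRange 2 (2 + (m : Int)) 1).foldl
        (fun a i => PySem.List.pySetD a i
          (PySem.List.pyGetD a i 0 + PySem.List.pyGetD a (i - 1) 0)) marked).length
        = (N + 1).toNat := by rw [pv_prefix_len, hmlen]
    apply List.ext_getElem
    · rw [hplen, List.length_cons, List.length_map, PySem.List.length_pyRange_one]
      omega
    · intro q h1 h2
      have hqN : (q : Int) ≤ N := by rw [hplen] at h1; omega
      rw [← List.getD_eq_getElem _ 0 h1, hpget q]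
      rcases Nat.eq_zero_or_pos q with hq0 | hqpos
      · subst hq0
        rw [if_neg (by norm_num), hmget 0, if_neg (by norm_num)]
        rfl
      · have hcond : 1 ≤ (q : Int) ∧ (q : Int) < 2 + (m : Int) := by omega
        rw [if_pos hcond]
        have hmapeq : (List.range q).map (fun u => marked.getD (u + 1) 0)
            = (List.range q).map (fun (u : Nat) => pvMvalI S (u : Int)) := by
          apply List.map_congr_left
          intro u hu
          have hu' : u < q := List.mem_range.mp hu
          rw [hmget (u + 1), if_pos (by constructor <;> push_cast <;> omega)]
          congr 1
          push_cast
          ring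
        rw [hmapeq, pv_sum_swap S q hqpos
          (fun p hp => (hkeys p hp).resolve_right (by omega))]
        obtain ⟨k, rfl⟩ : ∃ k : Nat, q = k + 1 := ⟨q - 1, by omega⟩
        rw [List.getElem_cons_succ, List.getElem_map, PySem.List.foldl_add, zero_add,
          PySem.List.getElem_pyRange_one]
        have hxy : ((k + 1 : Nat) : Int) - 1 = (1 + (k : Int)) - 1 := by push_cast; ring
        rw [hxy]

-- ===== VERDICT (by name: the statement is the Claim_ definition above) =====
theorem solution_spec : Claim_equal_solution := by
  intro N K jumps checks _hdom hpre
  obtain ⟨hj, hc⟩ := hpre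
  unfold Spec_solution solution solution_alt
  simp only [PySem.Dict.foldl_insert_getD_add_one_eq_counter,
    PySem.List.foldl_append_singleton_eq_map, List.nil_append]
  by_cases hNneg : N < 0
  · have hchecks : checks = [] := by
      rw [List.eq_nil_iff_forall_not_mem]
      intro c hcmem
      have := hc c hcmem
      omega
    subst hchecks
    rfl
  · rw [pv_prefix_toList _ (fun x hx => by have := PySem.List.mem_pyRange_one.mp hx; omega),
      pv_markAll_toList N _ (pv_keys N jumps hj), Array.toList_replicate,
      pv_arrays_eq N jumps (by omega) hj]
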